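-- pv_equiv track=rewrite | github.com/asiya00/Python-Solved-coding-problems- | TCS_coding_question2.py | Sober_Walk
-- ===== SOURCE A (Python) =====
-- def Sober_Walk(n):
-- 	x = 0
-- 	y = 0
-- 	increment = 10
-- 	direction = "R"
-- 	for i in range(n):
-- 		if direction == "R":
-- 			x += increment
-- 			increment += 10
-- 			direction = "U"
-- 		elif direction == "U":
-- 			y += increment
-- 			increment += 10
-- 			direction = "L"
-- 		elif direction == "L":
-- 			 x -= increment
-- 			 increment += 10
-- 			 direction = "D"
-- 		elif direction == "D":
-- 			y -= increment
-- 			increment += 10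
-- 			direction = "R"
-- 	return x,y
-- ===== SOURCE B (Python) =====
-- def Sober_Walk(n):
--     if n <= 0:
--         return 0, 0
--     q, r = divmod(n, 4)
--     x = -20 * q
--     y = -20 * q
--     if r >= 1:
--         x += 10 * (4 * q + 1)
--     if r >= 2:
--         y += 10 * (4 * q + 2)
--     if r == 3:
--         x -= 10 * (4 * q + 3)
--     return x, y
-- ===== Notes on version B (the rewrite author's own statement) =====
-- stated objective: faster
-- what changed: Replaced the step-by-step simulation loop with a closed form: every full four-step cycle contributes a fixed net displacement, so the position is computed from the cycle count plus at most three remainder terms.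
import Mathlib
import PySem

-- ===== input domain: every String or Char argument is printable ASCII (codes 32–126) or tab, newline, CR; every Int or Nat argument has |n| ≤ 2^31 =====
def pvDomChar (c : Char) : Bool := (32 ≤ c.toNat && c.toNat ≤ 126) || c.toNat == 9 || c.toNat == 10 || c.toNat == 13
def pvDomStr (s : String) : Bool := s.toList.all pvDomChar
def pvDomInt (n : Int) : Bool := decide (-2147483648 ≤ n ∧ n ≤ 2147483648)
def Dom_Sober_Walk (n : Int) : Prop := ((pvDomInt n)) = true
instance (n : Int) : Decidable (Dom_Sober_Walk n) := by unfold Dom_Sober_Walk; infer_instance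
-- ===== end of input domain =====

-- B replaces A's linear step-by-step simulation by a constant-time closed form over full four-step cycles.

-- ===== PORT A =====
-- for i in range(n): one fuel step per iteration, same state (x, y, increment, direction)
def swLoop : Nat → Int → Int → Int → String → Int × Int × Int × String
  | 0, x, y, inc, d => (x, y, inc, d)
  | k + 1, x, y, inc, d =>
    if d = "R" then swLoop k (x + inc) y (inc + 10) "U"
    else if d = "U" then swLoop k x (y + inc) (inc + 10) "L"
    else if d = "L" then swLoop k (x - inc) y (inc + 10) "D"
    else if d = "D" then swLoop k x (y - inc) (inc + 10) "R"
    else swLoop k x y inc d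

def Sober_Walk (n : Int) : List Int :=
  let s := swLoop n.toNat 0 0 10 "R"
  [s.1, s.2.1]

-- ===== PORT B =====
def Sober_Walk_alt (n : Int) : List Int :=
  if n ≤ 0 then [0, 0]
  else
    let q := PySem.Int.floordiv n 4
    let r := PySem.Int.mod n 4
    let x := -20 * q
    let y := -20 * q
    let x := if r ≥ 1 then x + 10 * (4 * q + 1) else x
    let y := if r ≥ 2 then y + 10 * (4 * q + 2) else y
    let x := if r = 3 then x - 10 * (4 * q + 3) else x
    [x, y]

-- ===== PRECONDITION & SPEC =====
def Spec_Sober_Walk (n : Int) (out : List Int) : Prop := out = Sober_Walk_alt n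
instance (n : Int) (out : List Int) : Decidable (Spec_Sober_Walk n out) := by unfold Spec_Sober_Walk; infer_instance

-- ===== CLAIM (what is proved, stated in full; the proofs are below) =====
def Claim_equal_Sober_Walk : Prop := ∀ (n : Int), Dom_Sober_Walk n → Spec_Sober_Walk n (Sober_Walk n)

-- ===== LEMMAS AND PROOFS =====

theorem swLoop_four (k : Nat) (x y inc : Int) :
    swLoop (k + 4) x y inc "R" = swLoop k (x - 20) (y - 20) (inc + 40) "R" := by
  show swLoop (k + 1 + 1 + 1 + 1) x y inc "R" = _
  simp only [swLoop, String.reduceEq, reduceIte]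
  ring_nf

theorem swLoop_shift (q : Nat) (r : Nat) (x y inc : Int) :
    swLoop (r + 4 * q) x y inc "R"
      = swLoop r (x - 20 * q) (y - 20 * q) (inc + 40 * q) "R" := by
  induction q generalizing x y inc with
  | zero => simp
  | succ q ih =>
    have h : r + 4 * (q + 1) = (r + 4 * q) + 4 := by ring
    rw [h, swLoop_four, ih]
    congr 1 <;> push_cast <;> ring

-- ===== VERDICT (by name: the statement is the Claim_ definition above) =====
theorem Sober_Walk_spec : Claim_equal_Sober_Walk := by
  intro n _
  unfold Spec_Sober_Walk Sober_Walk Sober_Walk_alt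
  by_cases hn : n ≤ 0
  · have h0 : n.toNat = 0 := Int.toNat_of_nonpos hn
    simp [h0, swLoop, hn]
  · push Not at hn
    rw [if_neg (by omega)]
    have hq : PySem.Int.floordiv n 4 = n / 4 := PySem.Int.floordiv_eq_ediv_of_pos (by norm_num)
    have hr : PySem.Int.mod n 4 = n % 4 := PySem.Int.mod_eq_emod_of_pos (by norm_num)
    set m := n.toNat with hm
    have hnm : (m : Int) = n := Int.toNat_of_nonneg (le_of_lt hn)
    have hsplit : m = m % 4 + 4 * (m / 4) := by omega
    have hqm : n / 4 = ((m / 4 : Nat) : Int) := by omega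
    have hrm : n % 4 = ((m % 4 : Nat) : Int) := by omega
    rw [hq, hr, hqm, hrm, hsplit, swLoop_shift]
    have h4 : m % 4 < 4 := Nat.mod_lt _ (by norm_num)
    interval_cases h : m % 4 <;> simp [swLoop] <;> constructor <;> omega
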